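-- pv_equiv track=rewrite | github.com/Handskp/py_ITEA | hw_4_2_v2.py | clear_word
-- ===== SOURCE A (Python) =====
-- import string
--
-- def clear_word(word, filterstr):
--     """Бесполезная функция из задачи 3"""
--     check_str = string.punctuation + string.whitespace + string.digits + string.ascii_letters
--     result = word
--     i = 0
--     while i < len(word):
--         if word[i] not in check_str:
--             raise ValueError(word[i], i)
--         elif word[i] in filterstr:
--             result = result.replace(word[i], '')
--             i += 1
--         else:
--             i += 1
--             continue
--     return result
-- ===== SOURCE B (Python) =====
-- import string
--
-- def clear_word(word, filterstr):
--     """Validate first, then strip all filter characters in one table-driven pass."""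
--     allowed = set(string.punctuation + string.whitespace + string.digits + string.ascii_letters)
--     for i, ch in enumerate(word):
--         if ch not in allowed:
--             raise ValueError(ch, i)
--     return word.translate(str.maketrans('', '', filterstr))
-- ===== Notes on version B (the rewrite author's own statement) =====
-- stated objective: faster
-- what changed: A interleaves validation with repeated full-string result.replace passes (one per filter-character hit) inside an index-driven while loop; B first validates the whole word against a precomputed allowed set, then deletes all filter characters in a single table-driven str.translate pass.
import Mathlib
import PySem

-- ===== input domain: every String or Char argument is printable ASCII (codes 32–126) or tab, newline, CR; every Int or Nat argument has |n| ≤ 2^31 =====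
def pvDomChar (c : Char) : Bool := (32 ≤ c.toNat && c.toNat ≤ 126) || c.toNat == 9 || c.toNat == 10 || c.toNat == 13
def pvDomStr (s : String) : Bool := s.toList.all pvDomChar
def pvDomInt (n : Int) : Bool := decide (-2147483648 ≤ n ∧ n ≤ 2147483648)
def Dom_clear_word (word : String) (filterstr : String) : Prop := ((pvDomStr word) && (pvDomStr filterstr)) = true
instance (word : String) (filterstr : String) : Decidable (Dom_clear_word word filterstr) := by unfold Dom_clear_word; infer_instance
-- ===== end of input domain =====

-- B validates the word in one pass against a precomputed allowed set, then deletes all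
-- filter characters in a single table-driven pass (str.translate), instead of A's
-- index-driven while loop with one full-string result.replace per filter hit.


-- string.punctuation + string.whitespace + string.digits + string.ascii_letters (exact, in Python's order)
def checkChars : List Char :=
  "!\"#$%&'()*+,-./:;<=>?@[\\]^_`{|}~ \t\n\r\x0b\x0c0123456789abcdefghijklmnopqrstuvwxyzABCDEFGHIJKLMNOPQRSTUVWXYZ".toList

-- ===== PORT A =====
-- A's while loop: index i walks word; the string being built is carried as List Char.
-- 'word[i] in filterstr' is PySem.Chars.isIn on the single-char string; 'result.replace(word[i], "")'
-- is PySem.Chars.replace result [c] [].  The 'raise ValueError' branch (unreachable under Pre_)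
-- returns the current result, as the port must return a String.
def clear_word.loop (flt : List Char) (rest : List Char) (result : List Char) : List Char :=
  match rest with
  | [] => result
  | c :: rs =>
    if !(PySem.Chars.isIn [c] checkChars) then result           -- raise ValueError(word[i], i): outside Pre_
    else if PySem.Chars.isIn [c] flt then
      clear_word.loop flt rs (PySem.Chars.replace result [c] [])
    else
      clear_word.loop flt rs result

def clear_word (word : String) (filterstr : String) : String :=
  String.mk (clear_word.loop filterstr.toList word.toList word.toList)

-- ===== PORT B =====
-- B: one validation pass over an allowed SET, then one deletion pass.
-- str.translate with a deletion table of filterstr deletes exactly the characters of filterstr.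
def allowedSet : PySem.Set Char := PySem.Set.ofList checkChars

def clear_word_alt (word : String) (filterstr : String) : String :=
  if word.toList.all (fun c => PySem.Set.contains allowedSet c) then
    String.mk (word.toList.filter (fun c => !(filterstr.toList.contains c)))
  else ""                                                        -- raise ValueError(ch, i): outside Pre_

-- ===== PRECONDITION & SPEC =====
-- Pre_ excludes exactly the inputs on which A raises ValueError: a word containing a character
-- outside the allowed set.  Every input in Dom_clear_word satisfies Pre_ (all of Dom is admitted).
def Pre_clear_word (word : String) (filterstr : String) : Prop :=
  word.toList.all (fun c => checkChars.contains c) = true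
instance (word : String) (filterstr : String) : Decidable (Pre_clear_word word filterstr) := by
  unfold Pre_clear_word; infer_instance

def pvWitness_clear_word : String × String := ("ab,ba", "b,")

def Spec_clear_word (word : String) (filterstr : String) (out : String) : Prop := out = clear_word_alt word filterstr
instance (word : String) (filterstr : String) (out : String) : Decidable (Spec_clear_word word filterstr out) := by unfold Spec_clear_word; infer_instance

-- ===== CLAIM (what is proved, stated in full; the proofs are below) =====
def Claim_equal_clear_word : Prop := ∀ (word : String) (filterstr : String), Dom_clear_word word filterstr → Pre_clear_word word filterstr → Spec_clear_word word filterstr (clear_word word filterstr)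

-- ===== LEMMAS AND PROOFS =====

lemma singleton_isIn (c : Char) (l : List Char) :
    PySem.Chars.isIn [c] l = l.contains c := by
  rcases h : PySem.Chars.isIn [c] l with _ | _
  · rw [PySem.Chars.isIn_eq_false_iff] at h
    symm; simp only [List.contains_eq_mem, decide_eq_false_iff_not]
    intro hm
    obtain ⟨s, t, rfl⟩ := List.append_of_mem hm
    exact h ⟨s, t, by simp⟩
  · rw [PySem.Chars.isIn_iff_infix] at h
    symm; simp only [List.contains_eq_mem, decide_eq_true_eq]
    exact List.singleton_sublist.mp h.sublist

lemma replace_go_single (ch : Char) :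
    ∀ (fuel : Nat) (l acc : List Char), l.length ≤ fuel →
      PySem.Chars.replace.go [ch] [] fuel l acc = acc.reverse ++ l.filter (fun c => !(c == ch)) := by
  intro fuel
  induction fuel with
  | zero =>
    intro l acc h
    have : l = [] := List.eq_nil_of_length_eq_zero (Nat.le_zero.mp h)
    subst this
    simp [PySem.Chars.replace.go]
  | succ n ih =>
    intro l acc h
    cases l with
    | nil => simp [PySem.Chars.replace.go]
    | cons c t =>
      simp only [PySem.Chars.replace.go]
      by_cases hc : c = ch
      · subst hc
        have hpre : [c].isPrefixOf (c :: t) = true := by simp [List.isPrefixOf]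
        rw [if_pos hpre]
        simp only [List.length, List.drop_succ_cons, List.drop_zero, List.reverse_nil,
          List.nil_append]
        rw [ih t acc (by simpa using Nat.le_of_succ_le_succ h)]
        simp
      · have hpre : [ch].isPrefixOf (c :: t) = false := by
          simp [List.isPrefixOf]
          intro h'; exact absurd h'.symm hc
        rw [if_neg (by simp [hpre])]
        rw [ih t (c :: acc) (by simpa using Nat.le_of_succ_le_succ h)]
        simp [hc]

lemma replace_single (ch : Char) (l : List Char) :
    PySem.Chars.replace l [ch] [] = l.filter (fun c => !(c == ch)) := by
  rw [PySem.Chars.replace]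
  simp only [List.isEmpty_cons, Bool.false_eq_true, if_false]
  simpa using replace_go_single ch l.length l [] (le_refl _)

lemma loopA_inv (flt : List Char) :
    ∀ (rest result : List Char), (∀ c ∈ rest, c ∈ checkChars) →
      clear_word.loop flt rest result
        = result.filter (fun c => !(flt.contains c && rest.contains c)) := by
  intro rest
  induction rest with
  | nil => intro result _; simp [clear_word.loop]
  | cons c rs ih =>
    intro result hchk
    have hc : PySem.Chars.isIn [c] checkChars = true := by
      rw [singleton_isIn]; simp only [List.contains_eq_mem, decide_eq_true_eq]
      exact hchk c (List.mem_cons_self ..)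
    simp only [clear_word.loop, hc, Bool.not_true, Bool.false_eq_true, if_false]
    have hrs : ∀ d ∈ rs, d ∈ checkChars := fun d hd => hchk d (List.mem_cons_of_mem _ hd)
    rw [singleton_isIn]
    by_cases hf : flt.contains c = true
    · have hfm : c ∈ flt := by simpa using hf
      rw [if_pos hf, replace_single, ih _ hrs, List.filter_filter]
      apply List.filter_congr
      intro d _
      by_cases hdc : d = c
      · subst hdc; simp [hfm]
      · simp [hdc]
    · have hfm : c ∉ flt := by simpa using hf
      rw [if_neg hf, ih _ hrs]
      apply List.filter_congr
      intro d _
      by_cases hdc : d = c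
      · subst hdc; simp [hfm]
      · simp [hdc]

-- ===== VERDICT (by name: the statement is the Claim_ definition above) =====
theorem clear_word_spec : Claim_equal_clear_word := by
  intro word filterstr _ hpre
  unfold Pre_clear_word at hpre
  have hpre' : ∀ c ∈ word.toList, c ∈ checkChars := by simpa using hpre
  unfold Spec_clear_word clear_word clear_word_alt
  have hall : word.toList.all (fun c => PySem.Set.contains allowedSet c) = true := by
    simp only [List.all_eq_true]
    intro c hc
    rw [PySem.Set.contains_iff]
    unfold allowedSet
    rw [PySem.Set.mem_ofList]
    exact hpre' c hc
  rw [if_pos hall, loopA_inv _ _ _ hpre']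
  congr 1
  apply List.filter_congr
  intro c hc
  simp [List.contains_eq_mem, hc]
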